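-- pv_equiv track=rewrite | github.com/snuvclab/perse | code/avatar-model/datasets/datamodule.py | find_indices_of_substring
-- ===== SOURCE A (Python) =====
-- def find_indices_of_substring(lst, substring):
--     start_index = end_index = -1
--
--     for i, s in enumerate(lst):
--         if substring in s:
--             # If start_index is not set yet, set it to the current index
--             if start_index == -1:
--                 start_index = i
--             # Update end_index to the current index
--             end_index = i
--
--     return start_index, end_index
-- ===== SOURCE B (Python) =====
-- def find_indices_of_substring(lst, substring):
--     start_index = -1
--     for i, s in enumerate(lst):
--         if substring in s:
--             start_index = i
--             break
--     end_index = -1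
--     for i in range(len(lst) - 1, -1, -1):
--         if substring in lst[i]:
--             end_index = i
--             break
--     return start_index, end_index
-- ===== Notes on version B (the rewrite author's own statement) =====
-- stated objective: alternative
-- what changed: Replaced the single full pass carrying two accumulators by two independent early-terminating scans: a forward scan that stops at the first match and a backward scan that stops at the last match.
import Mathlib
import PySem

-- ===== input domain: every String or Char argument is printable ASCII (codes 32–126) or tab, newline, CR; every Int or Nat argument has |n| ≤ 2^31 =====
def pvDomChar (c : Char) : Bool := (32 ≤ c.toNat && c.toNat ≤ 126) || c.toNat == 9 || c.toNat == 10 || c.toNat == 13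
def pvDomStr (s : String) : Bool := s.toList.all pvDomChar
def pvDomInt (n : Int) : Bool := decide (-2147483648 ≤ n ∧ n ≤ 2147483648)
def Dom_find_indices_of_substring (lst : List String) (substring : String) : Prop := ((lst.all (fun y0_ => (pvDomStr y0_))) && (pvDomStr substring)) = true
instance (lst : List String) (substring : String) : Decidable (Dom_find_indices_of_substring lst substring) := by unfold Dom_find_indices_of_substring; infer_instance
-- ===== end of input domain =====

-- B replaces A's single accumulating pass by two independent early-terminating directional
-- scans (forward for the first match, backward for the last); same O(n) cost, return value only.

-- ===== PORT A =====
-- the for-loop over enumerate(lst): index counter i, loop state (start_index, end_index)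
def pvGoA (lst : List String) (substring : String) (i start_index end_index : Int) :
    Int × Int :=
  match lst with
  | [] => (start_index, end_index)
  | s :: rest =>
    if PySem.Str.isIn substring s then
      pvGoA rest substring (i + 1) (if start_index == -1 then i else start_index) i
    else
      pvGoA rest substring (i + 1) start_index end_index

def find_indices_of_substring (lst : List String) (substring : String) : Int × Int :=
  pvGoA lst substring 0 (-1) (-1)

-- ===== PORT B =====
-- forward scan: first index whose element contains substring, else -1 (break on first hit)
def pvFwd (lst : List String) (substring : String) (i : Int) : Int :=
  match lst with
  | [] => -1
  | s :: rest => if PySem.Str.isIn substring s then i else pvFwd rest substring (i + 1)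

-- backward scan: the range(len-1, -1, -1) loop visits lst.reverse with index counting down
def pvBwd (rev : List String) (substring : String) (i : Int) : Int :=
  match rev with
  | [] => -1
  | s :: rest => if PySem.Str.isIn substring s then i else pvBwd rest substring (i - 1)

def find_indices_of_substring_alt (lst : List String) (substring : String) : Int × Int :=
  (pvFwd lst substring 0, pvBwd lst.reverse substring ((lst.length : Int) - 1))

-- ===== PRECONDITION & SPEC =====
def Spec_find_indices_of_substring (lst : List String) (substring : String) (out : Int × Int) : Prop := out = find_indices_of_substring_alt lst substring
instance (lst : List String) (substring : String) (out : Int × Int) : Decidable (Spec_find_indices_of_substring lst substring out) := by unfold Spec_find_indices_of_substring; infer_instance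

-- ===== CLAIM (what is proved, stated in full; the proofs are below) =====
def Claim_equal_find_indices_of_substring : Prop := ∀ (lst : List String) (substring : String), Dom_find_indices_of_substring lst substring → Spec_find_indices_of_substring lst substring (find_indices_of_substring lst substring)

-- ===== LEMMAS AND PROOFS =====

-- forward-scan semantics of A's first component
theorem pvGoA_fst_set (lst : List String) (substring : String) (i st en : Int)
    (h : st ≠ -1) : (pvGoA lst substring i st en).1 = st := by
  induction lst generalizing i st en with
  | nil => rfl
  | cons s rest ih =>
    simp only [pvGoA]
    have hst : (if st == -1 then i else st) = st := by simp [h]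
    by_cases hm : PySem.Str.isIn substring s
    · rw [if_pos hm, hst]; exact ih _ _ _ h
    · rw [if_neg hm]; exact ih _ _ _ h

theorem pvGoA_fst (lst : List String) (substring : String) (i en : Int) (hi : 0 ≤ i) :
    (pvGoA lst substring i (-1) en).1 = pvFwd lst substring i := by
  induction lst generalizing i en with
  | nil => rfl
  | cons s rest ih =>
    simp only [pvGoA, pvFwd]
    by_cases hm : PySem.Str.isIn substring s
    · rw [if_pos hm, if_pos hm]
      simpa using pvGoA_fst_set rest substring (i + 1) i i (by omega)
    · rw [if_neg hm, if_neg hm]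
      exact ih (i + 1) en (by omega)

-- forward helper for A's second component: last-match index with default en
def pvLastM (lst : List String) (substring : String) (i en : Int) : Int :=
  match lst with
  | [] => en
  | s :: rest =>
    pvLastM rest substring (i + 1) (if PySem.Str.isIn substring s then i else en)

theorem pvGoA_snd (lst : List String) (substring : String) (i st en : Int) :
    (pvGoA lst substring i st en).2 = pvLastM lst substring i en := by
  induction lst generalizing i st en with
  | nil => rfl
  | cons s rest ih =>
    simp only [pvGoA, pvLastM]
    split_ifs with hm <;> simp [ih]

theorem pvLastM_snoc (xs : List String) (s : String) (substring : String) (i en : Int) :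
    pvLastM (xs ++ [s]) substring i en =
      if PySem.Str.isIn substring s then i + xs.length else pvLastM xs substring i en := by
  induction xs generalizing i en with
  | nil => simp [pvLastM]
  | cons x xs ih =>
    simp only [List.cons_append, pvLastM, ih, List.length_cons]
    split_ifs <;> push_cast <;> ring

theorem pvLastM_eq_bwd (lst : List String) (substring : String) (i : Int) :
    pvLastM lst substring i (-1) =
      pvBwd lst.reverse substring (i + (lst.length : Int) - 1) := by
  induction lst using List.reverseRecOn with
  | nil => rfl
  | append_singleton xs s ih =>
    rw [pvLastM_snoc]
    simp only [List.reverse_append, List.reverse_singleton, List.singleton_append, pvBwd,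
      List.length_append, List.length_singleton]
    split_ifs with hm
    · push_cast; ring
    · rw [ih]; congr 1; push_cast; ring

-- ===== VERDICT (by name: the statement is the Claim_ definition above) =====
theorem find_indices_of_substring_spec : Claim_equal_find_indices_of_substring := by
  intro lst substring _
  unfold Spec_find_indices_of_substring find_indices_of_substring find_indices_of_substring_alt
  refine Prod.ext ?_ ?_
  · exact pvGoA_fst lst substring 0 (-1) le_rfl
  · rw [pvGoA_snd, pvLastM_eq_bwd]
    norm_num
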